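-- pv_equiv track=rewrite | github.com/kpomak/Algorithm | les_7_task_1.py | bubble_reverse_sort
-- ===== SOURCE A (Python) =====
-- def bubble_reverse_sort(array):
--     i = 1
--     while True:
--         flag = False
--         for j in range(len(array) - i):
--             if array[j] < array[j + 1]:
--                 array[j], array[j + 1] = array[j + 1], array[j]
--                 flag = True
--         if not flag:
--             break
--         i += 1
--     return i
-- ===== SOURCE B (Python) =====
-- def bubble_reverse_sort(array):
--     # Closed-form pass count: 1 + max over elements of the number of
--     # strictly smaller elements preceding it.  (A sorts `array` in place
--     # descending; B does not mutate it -- equivalence is about the return value.)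
--     best = 0
--     prefix = []
--     for x in array:
--         c = 0
--         for y in prefix:
--             if y < x:
--                 c += 1
--         if c > best:
--             best = c
--         prefix.append(x)
--     return best + 1
-- ===== Notes on version B (the rewrite author's own statement) =====
-- stated objective: simpler
-- what changed: B replaces A's repeated in-place bubble passes (loop until a pass makes no swap) by a direct formula: the answer is 1 plus the maximum over elements of the number of strictly smaller elements preceding it; B also does not mutate the input list, while A sorts it in place.
import Mathlib
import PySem

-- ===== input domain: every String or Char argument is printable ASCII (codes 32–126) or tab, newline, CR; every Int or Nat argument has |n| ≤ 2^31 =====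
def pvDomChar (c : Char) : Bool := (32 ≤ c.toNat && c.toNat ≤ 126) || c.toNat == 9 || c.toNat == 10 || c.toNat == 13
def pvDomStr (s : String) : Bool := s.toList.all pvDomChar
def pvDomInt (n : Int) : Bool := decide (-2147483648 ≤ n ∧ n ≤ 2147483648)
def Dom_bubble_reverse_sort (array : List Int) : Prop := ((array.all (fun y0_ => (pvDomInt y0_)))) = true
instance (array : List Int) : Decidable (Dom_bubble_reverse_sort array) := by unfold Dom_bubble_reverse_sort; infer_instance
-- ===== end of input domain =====

-- B replaces A's repeated bubble passes by a direct formula (1 + max over elements of the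
-- number of strictly smaller earlier elements); A sorts `array` in place, B does not mutate
-- it — the equivalence proved here is about the return value only.

-- ===== PORT A =====
-- termination measure for A's while-loop: number of ascending-ordered adjacent-free pairs
def pvInv : List Int → Nat
  | [] => 0
  | a :: t => t.countP (fun b => decide (a < b)) + pvInv t

-- the loop body `for j in range(n): if array[j] < array[j+1]: swap; flag = True`
-- (n adjacent comparisons from the left, returning the new list and the flag)
def passN : Nat → List Int → List Int × Bool
  | 0, l => (l, false)
  | _ + 1, [] => ([], false)
  | _ + 1, [a] => ([a], false)
  | n + 1, a :: b :: t =>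
      if a < b then
        let r := passN n (a :: t); (b :: r.1, true)
      else
        let r := passN n (b :: t); (a :: r.1, r.2)

theorem passN_perm : ∀ (n : Nat) (l : List Int), (passN n l).1.Perm l
  | 0, l => by simp [passN]
  | _ + 1, [] => by simp [passN]
  | _ + 1, [a] => by simp [passN]
  | n + 1, a :: b :: t => by
    simp only [passN]
    split
    · exact ((passN_perm n (a :: t)).cons b).trans (List.Perm.swap a b t)
    · exact (passN_perm n (b :: t)).cons a

-- cited by `decreasing_by` of the loop below
theorem pvInv_passN : ∀ (n : Nat) (l : List Int),
    pvInv (passN n l).1 + (passN n l).2.toNat ≤ pvInv l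
  | 0, l => by simp [passN]
  | _ + 1, [] => by simp [passN]
  | _ + 1, [a] => by simp [passN]
  | n + 1, a :: b :: t => by
    simp only [passN]
    split
    · rename_i hab
      have ih := pvInv_passN n (a :: t)
      have hc : (passN n (a :: t)).1.countP (fun y => decide (b < y))
          = (a :: t).countP (fun y => decide (b < y)) :=
        (passN_perm n (a :: t)).countP_eq _
      simp only [pvInv, List.countP_cons] at *
      have hba : ¬ b < a := by omega
      simp [hba, hab, hc] at *
      omega
    · rename_i hab
      have ih := pvInv_passN n (b :: t)
      have hc : (passN n (b :: t)).1.countP (fun y => decide (a < y))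
          = (b :: t).countP (fun y => decide (a < y)) :=
        (passN_perm n (b :: t)).countP_eq _
      simp only [pvInv, List.countP_cons] at *
      simp [hab, hc] at *
      omega

-- A's `while True:` loop; each iteration runs one restricted pass over the current list
def bubbleLoop (l : List Int) (i : Nat) : Int :=
  if h : (passN (l.length - i) l).2 = true then
    bubbleLoop (passN (l.length - i) l).1 (i + 1)
  else
    (i : Int)
termination_by pvInv l
decreasing_by
  have := pvInv_passN (l.length - i) l
  simp [h] at this
  omega

def bubble_reverse_sort (array : List Int) : Int := bubbleLoop array 1

-- ===== PORT B =====
-- `c = 0; for y in prefix: if y < x: c += 1`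
def countSmaller (x : Int) (pre : List Int) : Int :=
  pre.foldl (fun c y => if y < x then c + 1 else c) 0

-- the outer `for x in array:` loop, carrying `prefix` and `best`
def altGo (pre : List Int) (best : Int) : List Int → Int
  | [] => best
  | x :: rest =>
      let c := countSmaller x pre
      altGo (pre ++ [x]) (if c > best then c else best) rest

def bubble_reverse_sort_alt (array : List Int) : Int := altGo [] 0 array + 1

-- ===== PRECONDITION & SPEC =====
def Spec_bubble_reverse_sort (array : List Int) (out : Int) : Prop := out = bubble_reverse_sort_alt array
instance (array : List Int) (out : Int) : Decidable (Spec_bubble_reverse_sort array out) := by unfold Spec_bubble_reverse_sort; infer_instance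

-- ===== CLAIM (what is proved, stated in full; the proofs are below) =====
def Claim_equal_bubble_reverse_sort : Prop := ∀ (array : List Int), Dom_bubble_reverse_sort array → Spec_bubble_reverse_sort array (bubble_reverse_sort array)

-- ===== LEMMAS AND PROOFS =====

-- number of elements of P strictly smaller than x
def cnt (P : List Int) (x : Int) : Nat := P.countP (fun y => decide (y < x))

-- max over the elements of l of (number of strictly smaller predecessors), context prefix P
def Dx (P : List Int) : List Int → Nat
  | [] => 0
  | a :: t => max (cnt P a) (Dx (P ++ [a]) t)

-- one full bubble pass in carry form: m is the running element being compared rightward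
def passC : Int → List Int → List Int × Bool
  | m, [] => ([m], false)
  | m, b :: t =>
      if m < b then
        let r := passC m t; (b :: r.1, true)
      else
        let r := passC b t; (m :: r.1, r.2)

theorem Dx_perm : ∀ (l P P' : List Int), P.Perm P' → Dx P l = Dx P' l
  | [], _, _, _ => rfl
  | a :: t, P, P', h => by
    simp only [Dx, cnt, h.countP_eq]
    rw [Dx_perm t (P ++ [a]) (P' ++ [a]) (h.append_right [a])]

theorem cnt_append (P : List Int) (a x : Int) :
    cnt (P ++ [a]) x = cnt P x + (if a < x then 1 else 0) := by
  simp [cnt, List.countP_append, List.countP_cons]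

theorem cnt_zero (P : List Int) (m : Int) (h : ∀ y ∈ P, ¬ y < m) : cnt P m = 0 := by
  simp only [cnt, List.countP_eq_zero, decide_eq_true_eq]
  intro y hy
  have := h y hy
  omega

-- the key lemma: one full pass drops the max smaller-predecessor count by exactly one (Nat sub)
theorem pass_main : ∀ (t : List Int) (m : Int) (P : List Int),
    (∀ y ∈ P, ¬ y < m) → Dx P (passC m t).1 = Dx P (m :: t) - 1
  | [], m, P, h => by
    simp [passC, Dx, cnt_zero P m h]
  | b :: t, m, P, h => by
    have hPm : cnt P m = 0 := cnt_zero P m h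
    simp only [passC]
    split
    · rename_i hmb
      have ih := pass_main t m (b :: P) (by
        intro y hy
        rcases List.mem_cons.1 hy with rfl | hy
        · omega
        · exact h y hy)
      have e1 : Dx (P ++ [b]) (passC m t).1 = Dx (b :: P) (passC m t).1 :=
        Dx_perm _ _ _ (List.perm_append_singleton b P)
      have e2 : Dx (b :: P) (m :: t) = Dx (b :: (P ++ [m])) t := by
        have hc : cnt (b :: P) m = 0 := by
          have hb : ¬ (decide (b < m)) = true := by simp; omega
          simp only [cnt, List.countP_cons, hb]
          simpa [cnt] using hPm
        simp only [Dx, hc, Nat.zero_max]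
        rfl
      have e3 : Dx (b :: (P ++ [m])) t = Dx (P ++ [m] ++ [b]) t :=
        Dx_perm _ _ _ (List.perm_append_singleton b (P ++ [m])).symm
      have e5 : cnt (P ++ [m]) b = cnt P b + 1 := by simp [cnt_append, hmb]
      show max (cnt P b) (Dx (P ++ [b]) (passC m t).1) = Dx P (m :: b :: t) - 1
      rw [e1, ih, e2, e3]
      show _ = max (cnt P m) (max (cnt (P ++ [m]) b) (Dx (P ++ [m] ++ [b]) t)) - 1
      rw [hPm, e5]
      omega
    · rename_i hmb
      have ih := pass_main t b (m :: P) (by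
        intro y hy
        rcases List.mem_cons.1 hy with rfl | hy
        · omega
        · have := h y hy; omega)
      have e1 : Dx (P ++ [m]) (passC b t).1 = Dx (m :: P) (passC b t).1 :=
        Dx_perm _ _ _ (List.perm_append_singleton m P)
      have e2 : Dx (m :: P) (b :: t) = Dx (P ++ [m]) (b :: t) :=
        Dx_perm _ _ _ (List.perm_append_singleton m P).symm
      show max (cnt P m) (Dx (P ++ [m]) (passC b t).1) = Dx P (m :: b :: t) - 1
      rw [e1, ih, e2, hPm]
      show _ = max (cnt P m) (Dx (P ++ [m]) (b :: t)) - 1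
      rw [hPm]
      omega

theorem chain_passC : ∀ (t : List Int) (m : Int),
    List.Pairwise (fun a b => b ≤ a) (m :: t) → passC m t = (m :: t, false)
  | [], m, _ => rfl
  | b :: t, m, h => by
    rcases List.pairwise_cons.1 h with ⟨hm, h2⟩
    have hmb : b ≤ m := hm b (by simp)
    have := chain_passC t b h2
    simp [passC, not_lt.2 hmb, this]

theorem passC_flag_false : ∀ (t : List Int) (m : Int),
    (passC m t).2 = false → List.Pairwise (fun a b => b ≤ a) (m :: t)
  | [], m, _ => by simp
  | b :: t, m, h => by
    simp only [passC] at h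
    split at h
    · simp at h
    · rename_i hmb
      have hp := passC_flag_false t b h
      refine List.pairwise_cons.2 ⟨?_, hp⟩
      intro x hx
      rcases List.mem_cons.1 hx with rfl | hx
      · exact not_lt.1 hmb
      · exact (List.rel_of_pairwise_cons hp hx).trans (not_lt.1 hmb)

theorem passC_settled : ∀ (t : List Int) (m : Int) (suf : List Int),
    List.Pairwise (fun a b => b ≤ a) suf → (∀ s ∈ suf, ∀ x ∈ m :: t, s ≤ x) →
    passC m (t ++ suf) = ((passC m t).1 ++ suf, (passC m t).2)
  | [], m, suf, hc, hs => by
    simp only [List.nil_append, passC]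
    cases suf with
    | nil => rfl
    | cons s suf' =>
      have h1 : ¬ m < s := not_lt.2 (hs s (by simp) m (by simp))
      have h2 : passC s suf' = (s :: suf', false) := chain_passC suf' s hc
      simp [passC, h1, h2]
  | b :: t, m, suf, hc, hs => by
    simp only [List.cons_append, passC]
    split
    · rename_i hmb
      have ih := passC_settled t m suf hc (by
        intro s hsm x hx
        rcases List.mem_cons.1 hx with rfl | hx
        · exact hs s hsm x (by simp)
        · exact hs s hsm x (by simp [hx]))
      simp [ih]
    · rename_i hmb
      have ih := passC_settled t b suf hc (by
        intro s hsm x hx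
        rcases List.mem_cons.1 hx with rfl | hx
        · exact hs s hsm x (by simp)
        · exact hs s hsm x (by simp [hx]))
      simp [ih]

theorem passN_bridge : ∀ (t : List Int) (m : Int) (suf : List Int),
    passN t.length (m :: (t ++ suf)) = ((passC m t).1 ++ suf, (passC m t).2)
  | [], m, suf => by simp [passN, passC]
  | b :: t, m, suf => by
    simp only [List.cons_append, List.length_cons, passN, passC]
    split
    · simp [passN_bridge t m suf]
    · simp [passN_bridge t b suf]

theorem passC_decomp : ∀ (t : List Int) (m : Int),
    ∃ q c, (passC m t).1 = q ++ [c] ∧ (m :: t).Perm (q ++ [c]) ∧ c ≤ m ∧ ∀ x ∈ t, c ≤ x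
  | [], m => ⟨[], m, rfl, by simp, le_rfl, by simp⟩
  | b :: t, m => by
    rcases passC_decomp t m with ⟨q, c, h1, h2, h3, h4⟩
    rcases passC_decomp t b with ⟨q', c', h1', h2', h3', h4'⟩
    simp only [passC]
    split
    · rename_i hmb
      refine ⟨b :: q, c, by simp [h1], ?_, h3, ?_⟩
      · exact (List.Perm.swap b m t).trans (h2.cons b)
      · intro x hx
        rcases List.mem_cons.1 hx with rfl | hx
        · exact h3.trans (le_of_lt hmb)
        · exact h4 x hx
    · rename_i hmb
      refine ⟨m :: q', c', by simp [h1'], (h2'.cons m), le_trans h3' (not_lt.1 hmb), ?_⟩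
      intro x hx
      rcases List.mem_cons.1 hx with rfl | hx
      · exact h3'
      · exact h4' x hx

theorem Dx_eq_zero_iff : ∀ (l P : List Int),
    Dx P l = 0 ↔ (∀ x ∈ l, ∀ y ∈ P, ¬ y < x) ∧ l.Pairwise (fun a b => b ≤ a)
  | [], P => by simp [Dx]
  | a :: t, P => by
    simp only [Dx, Nat.max_eq_zero_iff, Dx_eq_zero_iff t (P ++ [a]),
      cnt, List.countP_eq_zero, decide_eq_true_eq, List.pairwise_cons, List.mem_cons,
      List.mem_append]
    constructor
    · rintro ⟨h1, h2, h3⟩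
      refine ⟨?_, ?_, h3⟩
      · rintro x (rfl | hx) y hy
        · exact h1 y hy
        · exact h2 x hx y (Or.inl hy)
      · intro b hb
        have := h2 b hb a (Or.inr (Or.inl rfl))
        omega
    · rintro ⟨h1, h2, h3⟩
      refine ⟨fun y hy => h1 a (Or.inl rfl) y hy, ?_, h3⟩
      rintro x hx y (hy | rfl | hy)
      · exact h1 x (Or.inr hx) y hy
      · have := h2 x hx; omega
      · simp at hy

theorem loop_main : ∀ (d : Nat) (pre suf : List Int) (i : Nat),
    i = suf.length + 1 →
    List.Pairwise (fun a b => b ≤ a) suf →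
    (∀ s ∈ suf, ∀ p ∈ pre, s ≤ p) →
    Dx [] (pre ++ suf) = d →
    bubbleLoop (pre ++ suf) i = (i : Int) + d := by
  intro d
  induction d with
  | zero =>
    intro pre suf i hi hc hs hD
    have hch : List.Pairwise (fun a b : Int => b ≤ a) (pre ++ suf) :=
      ((Dx_eq_zero_iff (pre ++ suf) []).1 hD).2
    rw [bubbleLoop]
    cases pre with
    | nil =>
      have hn : (([] : List Int) ++ suf).length - i = 0 := by simp [hi]
      rw [hn]
      simp [passN]
    | cons m t =>
      have hn : ((m :: t) ++ suf).length - i = t.length := by simp [hi]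
      have hflag : (passC m t).2 = false := by
        have hp : List.Pairwise (fun a b : Int => b ≤ a) (m :: t) :=
          hch.sublist (List.sublist_append_left (m :: t) suf)
        rw [chain_passC t m hp]
      rw [hn]
      have hb := passN_bridge t m suf
      simp only [List.cons_append] at hb ⊢
      rw [hb]
      simp [hflag]
  | succ d ih =>
    intro pre suf i hi hc hs hD
    cases pre with
    | nil =>
      exfalso
      have h0 : Dx [] suf = 0 := (Dx_eq_zero_iff suf []).2 ⟨by simp, hc⟩
      simp only [List.nil_append] at hD
      omega
    | cons m t =>
      have hn : ((m :: t) ++ suf).length - i = t.length := by simp [hi]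
      have hb := passN_bridge t m suf
      rw [bubbleLoop, hn]
      simp only [List.cons_append] at hb hD ⊢
      rw [hb]
      cases hf : (passC m t).2 with
      | false =>
        exfalso
        have hp : List.Pairwise (fun a b : Int => b ≤ a) (m :: t) := passC_flag_false t m hf
        have hall : List.Pairwise (fun a b : Int => b ≤ a) (m :: (t ++ suf)) := by
          have := List.pairwise_append.2 ⟨hp, hc, fun a ha b hb => hs b hb a ha⟩
          simpa using this
        have h0 : Dx [] (m :: (t ++ suf)) = 0 :=
          (Dx_eq_zero_iff (m :: (t ++ suf)) []).2 ⟨by simp, hall⟩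
        omega
      | true =>
        rcases passC_decomp t m with ⟨q, c, hq, hperm, hcm, hct⟩
        have hcmem : c ∈ m :: t := hperm.symm.subset (by simp)
        have hDx' : Dx [] ((passC m t).1 ++ suf) = d := by
          have hmain := pass_main (t ++ suf) m [] (by simp)
          have hset := passC_settled t m suf hc hs
          rw [hset] at hmain
          simp only at hmain
          rw [hD] at hmain
          simpa using hmain
        have hlist : (passC m t).1 ++ suf = q ++ (c :: suf) := by
          rw [hq, List.append_assoc]
          rfl
        have key := ih q (c :: suf) (i + 1) (by simp [hi])
          (List.pairwise_cons.2 ⟨fun s hsm => hs s hsm c hcmem, hc⟩)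
          (by
            intro s hsm p hp
            have hpm : p ∈ m :: t := hperm.symm.subset (List.mem_append_left _ hp)
            rcases List.mem_cons.1 hsm with rfl | hsm
            · rcases List.mem_cons.1 hpm with rfl | hpt
              · exact hcm
              · exact hct p hpt
            · exact hs s hsm p hpm)
          (by rw [← hlist]; exact hDx')
        rw [hlist, key]
        push_cast
        ring_nf
        simp

theorem countSmaller_fold : ∀ (l : List Int) (x acc : Int),
    l.foldl (fun c y => if y < x then c + 1 else c) acc
      = acc + ((l.countP (fun y => decide (y < x)) : Nat) : Int)
  | [], x, acc => by simp
  | a :: l, x, acc => by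
    rw [List.foldl_cons, countSmaller_fold l x, List.countP_cons]
    by_cases h : a < x
    · simp only [decide_eq_true_eq, h, if_true]
      push_cast
      ring
    · simp [h]

theorem countSmaller_eq (pre : List Int) (x : Int) :
    countSmaller x pre = (cnt pre x : Int) := by
  simpa [countSmaller, cnt] using countSmaller_fold pre x 0

theorem altGo_eq : ∀ (rest pre : List Int) (best : Int), 0 ≤ best →
    altGo pre best rest = max best ((Dx pre rest : Nat) : Int)
  | [], pre, best, h => by
    simp [altGo, Dx, max_eq_left h]
  | x :: rest, pre, best, h => by
    simp only [altGo, countSmaller_eq]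
    have hge : (0 : Int) ≤ (if (cnt pre x : Int) > best then (cnt pre x : Int) else best) := by
      split_ifs <;> [positivity; exact h]
    rw [altGo_eq rest (pre ++ [x]) _ hge]
    show _ = max best ((max (cnt pre x) (Dx (pre ++ [x]) rest) : Nat) : Int)
    push_cast
    split_ifs with hcb <;> omega

-- ===== VERDICT (by name: the statement is the Claim_ definition above) =====
theorem bubble_reverse_sort_spec : Claim_equal_bubble_reverse_sort := by
  intro array _
  unfold Spec_bubble_reverse_sort bubble_reverse_sort bubble_reverse_sort_alt
  have hA : bubbleLoop array 1 = (1 : Int) + (Dx [] array : Int) := by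
    have h := loop_main (Dx [] array) array [] 1 (by simp) (by simp) (by simp)
      (by rw [List.append_nil])
    rw [List.append_nil] at h
    simpa using h
  have hB : altGo [] 0 array = max 0 ((Dx [] array : Nat) : Int) := altGo_eq array [] 0 le_rfl
  rw [hA, hB, max_eq_right (by positivity)]
  ring
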